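-- pv_equiv track=rewrite | github.com/NgocHuyen2309/Btap_buoi_5-2 | main.py | cac_doan_giam
-- ===== SOURCE A (Python) =====
-- def cac_doan_giam(ds):
--     result = []
--     temp = [ds[0]]
--     for i in range(1, len(ds)):
--         if ds[i] < ds[i - 1]:
--             temp.append(ds[i])
--         else:
--             if len(temp) > 1:
--                 result.append(temp[:])
--             temp = [ds[i]]
--     if len(temp) > 1:
--         result.append(temp)
--     return result
-- ===== SOURCE B (Python) =====
-- def cac_doan_giam(ds):
--     # boundary indices: 0, every i where the strict decrease breaks, then len(ds)
--     bounds = [0] + [i for i in range(1, len(ds)) if ds[i] >= ds[i - 1]] + [len(ds)]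
--     runs = [ds[a:b] for a, b in zip(bounds, bounds[1:])]
--     return [r for r in runs if len(r) > 1]
-- ===== Notes on version B (the rewrite author's own statement) =====
-- stated objective: alternative
-- what changed: Replaces A's accumulate-and-flush temp buffer with a two-phase decomposition: first compute the run boundary indices (0, every break of the strict decrease, len(ds)), then slice ds between consecutive boundaries and keep slices longer than 1.
import Mathlib
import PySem

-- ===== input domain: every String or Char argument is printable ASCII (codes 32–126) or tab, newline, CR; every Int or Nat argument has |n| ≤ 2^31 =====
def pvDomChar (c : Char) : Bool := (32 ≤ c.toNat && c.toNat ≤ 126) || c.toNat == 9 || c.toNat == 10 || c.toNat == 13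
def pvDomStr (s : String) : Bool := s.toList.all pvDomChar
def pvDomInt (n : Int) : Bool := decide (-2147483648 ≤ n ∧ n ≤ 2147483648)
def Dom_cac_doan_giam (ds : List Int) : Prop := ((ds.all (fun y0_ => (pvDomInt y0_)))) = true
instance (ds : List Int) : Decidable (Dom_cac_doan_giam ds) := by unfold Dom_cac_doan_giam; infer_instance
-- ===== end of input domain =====

-- B computes the same maximal strictly-decreasing runs by a boundaries-then-slice decomposition
-- instead of A's accumulate-and-flush buffer; Pre_ excludes only the empty list (A raises IndexError there).

-- ===== PORT A =====
-- A: single pass with a temp buffer, flushed (if longer than 1) at every break of the decrease.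
def cac_doan_giam (ds : List Int) : List (List Int) :=
  let st := (PySem.List.pyRange 1 (PySem.List.len ds) 1).foldl
    (fun (st : List (List Int) × List Int) i =>
      if PySem.List.pyGetD ds i 0 < PySem.List.pyGetD ds (i - 1) 0 then
        (st.1, st.2 ++ [PySem.List.pyGetD ds i 0])
      else if st.2.length > 1 then
        (st.1 ++ [st.2], [PySem.List.pyGetD ds i 0])
      else
        (st.1, [PySem.List.pyGetD ds i 0]))
    ([], [PySem.List.pyGetD ds 0 0])
  if st.2.length > 1 then st.1 ++ [st.2] else st.1

-- ===== PORT B =====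
-- B: boundary indices 0 :: breaks ++ [len ds], then slice between consecutive boundaries.
def cac_doan_giam_alt (ds : List Int) : List (List Int) :=
  let bounds : List Int :=
    [0] ++ (PySem.List.pyRange 1 (PySem.List.len ds) 1).filter
      (fun i => decide (PySem.List.pyGetD ds i 0 ≥ PySem.List.pyGetD ds (i - 1) 0))
    ++ [PySem.List.len ds]
  let runs := (bounds.zip (PySem.List.slice bounds (some 1) none)).map
    (fun ab => PySem.List.slice ds (some ab.1) (some ab.2))
  runs.filter (fun r => r.length > 1)

-- ===== PRECONDITION & SPEC =====
-- Pre_ excludes only the empty list, on which A raises IndexError (ds[0]).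
def Pre_cac_doan_giam (ds : List Int) : Prop := ds ≠ []
instance (ds : List Int) : Decidable (Pre_cac_doan_giam ds) := by unfold Pre_cac_doan_giam; infer_instance
def pvWitness_cac_doan_giam : List Int := [5, 3, 1, 2, 0]

def Spec_cac_doan_giam (ds : List Int) (out : List (List Int)) : Prop := out = cac_doan_giam_alt ds
instance (ds : List Int) (out : List (List Int)) : Decidable (Spec_cac_doan_giam ds out) := by unfold Spec_cac_doan_giam; infer_instance

-- ===== CLAIM (what is proved, stated in full; the proofs are below) =====
def Claim_equal_cac_doan_giam : Prop := ∀ (ds : List Int), Dom_cac_doan_giam ds → Pre_cac_doan_giam ds → Spec_cac_doan_giam ds (cac_doan_giam ds)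

-- ===== LEMMAS AND PROOFS =====

def pvCuts (ds : List Int) (m : Int) : List Int :=
  (PySem.List.pyRange 1 m 1).filter
    (fun i => decide (PySem.List.pyGetD ds i 0 ≥ PySem.List.pyGetD ds (i - 1) 0))

def pvLast (cs : List Int) : Int := cs.getLastD 0

def pvDone (ds : List Int) (m : Int) : List (List Int) :=
  (((0 :: pvCuts ds m).zip (pvCuts ds m)).map
    (fun ab => PySem.List.slice ds (some ab.1) (some ab.2))).filter (fun r => r.length > 1)

lemma pvCuts_mem {ds : List Int} {m i : Int} (h : i ∈ pvCuts ds m) : 1 ≤ i ∧ i < m := by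
  have := List.of_mem_filter h
  have hm := List.mem_of_mem_filter h
  exact (PySem.List.mem_pyRange_one).1 hm

lemma pvLast_bounds (ds : List Int) (m : Int) (h : 1 ≤ m) :
    0 ≤ pvLast (pvCuts ds m) ∧ pvLast (pvCuts ds m) < m := by
  have hmem := List.getLastD_mem_cons (l := pvCuts ds m) (a := (0:Int))
  rcases List.mem_cons.1 hmem with h0 | hc
  · unfold pvLast; omega
  · have := pvCuts_mem hc; unfold pvLast; omega

lemma pv_slice_snoc (ds : List Int) (a m : Int) (h0 : 0 ≤ a) (ham : a ≤ m)
    (hm : m < (ds.length : Int)) :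
    PySem.List.slice ds (some a) (some m) ++ [PySem.List.pyGetD ds m 0]
      = PySem.List.slice ds (some a) (some (m + 1)) := by
  rw [PySem.List.slice_toNat ds h0 (by omega), PySem.List.slice_toNat ds h0 (by omega),
    PySem.List.pyGetD_eq_getElem ds 0 (by omega) hm]
  have h1 : (m + 1).toNat - a.toNat = (m.toNat - a.toNat) + 1 := by omega
  rw [h1, List.take_add_one]
  congr 1
  have hlt : m.toNat - a.toNat < (ds.drop a.toNat).length := by
    simp [List.length_drop]; omega
  rw [List.getElem?_eq_getElem hlt]
  simp [List.getElem_drop]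
  congr 1
  omega

lemma pv_slice_single (ds : List Int) (m : Int) (h0 : 0 ≤ m) (hm : m < (ds.length : Int)) :
    PySem.List.slice ds (some m) (some (m + 1)) = [PySem.List.pyGetD ds m 0] := by
  rw [← pv_slice_snoc ds m m h0 le_rfl hm, PySem.List.slice_toNat ds h0 h0]
  simp

lemma pv_zipconsec {α : Type} (a x : α) (l : List α) :
    ((a :: l) ++ [x]).zip (l ++ [x]) = (a :: l).zip l ++ [(l.getLastD a, x)] := by
  induction l generalizing a with
  | nil => simp
  | cons b t ih =>
      rw [List.getLastD_cons]
      simpa using ih b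

lemma pvCuts_succ (ds : List Int) (m : Int) (h : 1 ≤ m) :
    pvCuts ds (m + 1) = pvCuts ds m ++
      (if PySem.List.pyGetD ds m 0 ≥ PySem.List.pyGetD ds (m - 1) 0 then [m] else []) := by
  unfold pvCuts
  rw [PySem.List.pyRange_one_succ_right (by omega), List.filter_append]
  simp [List.filter_singleton]

lemma pv_inv (ds : List Int) (hne : ds ≠ []) (k : Nat) (hk : 1 + (k : Int) ≤ (ds.length : Int)) :
    (PySem.List.pyRange 1 (1 + (k : Int)) 1).foldl
      (fun (st : List (List Int) × List Int) i =>
        if PySem.List.pyGetD ds i 0 < PySem.List.pyGetD ds (i - 1) 0 then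
          (st.1, st.2 ++ [PySem.List.pyGetD ds i 0])
        else if st.2.length > 1 then
          (st.1 ++ [st.2], [PySem.List.pyGetD ds i 0])
        else
          (st.1, [PySem.List.pyGetD ds i 0]))
      ([], [PySem.List.pyGetD ds 0 0])
      = (pvDone ds (1 + (k : Int)),
         PySem.List.slice ds (some (pvLast (pvCuts ds (1 + (k : Int))))) (some (1 + (k : Int)))) := by
  induction k with
  | zero =>
    simp only [Nat.cast_zero, add_zero]
    rw [PySem.List.pyRange_one_eq_nil le_rfl]
    have hc : pvCuts ds 1 = [] := by unfold pvCuts; rw [PySem.List.pyRange_one_eq_nil le_rfl]; rfl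
    simp only [List.foldl_nil, hc, pvDone, pvLast, List.zip_nil_right, List.map_nil,
      List.filter_nil, List.getLastD_nil]
    cases ds with
    | nil => exact absurd rfl hne
    | cons d t =>
      rw [PySem.List.slice_toNat _ le_rfl (by omega)]
      simp [PySem.List.pyGetD_of_nonneg _ _ le_rfl]
  | succ k ih =>
    have hm1 : (1 : Int) ≤ 1 + (k : Int) := by omega
    have hcast : (1 + ((k + 1 : Nat)) : Int) = (1 + (k : Int)) + 1 := by push_cast; ring
    rw [hcast, PySem.List.pyRange_one_succ_right hm1, List.foldl_append, ih (by omega)]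
    set m : Int := 1 + (k : Int) with hmdef
    have hmlen : m < (ds.length : Int) := by push_cast at hk ⊢; omega
    have hlb := pvLast_bounds ds m hm1
    simp only [List.foldl_cons, List.foldl_nil]
    by_cases hlt : PySem.List.pyGetD ds m 0 < PySem.List.pyGetD ds (m - 1) 0
    · have hnotge : ¬(PySem.List.pyGetD ds m 0 ≥ PySem.List.pyGetD ds (m - 1) 0) := by omega
      have hC : pvCuts ds (m + 1) = pvCuts ds m := by
        rw [pvCuts_succ ds m hm1, if_neg hnotge, List.append_nil]
      have hD : pvDone ds (m + 1) = pvDone ds m := by unfold pvDone; rw [hC]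
      rw [if_pos hlt, hD, hC]
      exact congrArg (fun s => (pvDone ds m, s))
        (pv_slice_snoc ds _ m hlb.1 (le_of_lt hlb.2) hmlen)
    · have hge : PySem.List.pyGetD ds m 0 ≥ PySem.List.pyGetD ds (m - 1) 0 := by omega
      have hC : pvCuts ds (m + 1) = pvCuts ds m ++ [m] := by
        rw [pvCuts_succ ds m hm1, if_pos hge]
      have hdone : pvDone ds (m + 1) = pvDone ds m ++
          (List.filter (fun r => r.length > 1)
            [PySem.List.slice ds (some (pvLast (pvCuts ds m))) (some m)]) := by
        unfold pvDone
        rw [hC, ← List.cons_append, pv_zipconsec, List.map_append, List.filter_append]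
        rfl
      have hlast : pvLast (pvCuts ds m ++ [m]) = m := List.getLastD_concat
      rw [if_neg hlt, hdone, hC, hlast, pv_slice_single ds m (by omega) hmlen]
      by_cases hl : (PySem.List.slice ds (some (pvLast (pvCuts ds m))) (some m)).length > 1
      · rw [if_pos hl]; simp [hl]
      · rw [if_neg hl]; simp [hl]

lemma pvB (ds : List Int) : cac_doan_giam_alt ds =
    pvDone ds (ds.length : Int) ++
      (List.filter (fun r => r.length > 1)
        [PySem.List.slice ds (some (pvLast (pvCuts ds (ds.length : Int))))
          (some (ds.length : Int))]) := by
  simp only [cac_doan_giam_alt, PySem.List.len_eq, PySem.List.slice_from_one,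
    List.singleton_append]
  rw [show ∀ (l : List Int) (x : Int), ((0 :: l) ++ [x]).tail = l ++ [x] from
      fun l x => by rw [List.cons_append, List.tail_cons],
    pv_zipconsec, List.map_append, List.filter_append]
  rfl

theorem pv_main (ds : List Int) (hne : ds ≠ []) : cac_doan_giam ds = cac_doan_giam_alt ds := by
  have hpos : 0 < ds.length := List.length_pos_iff.2 hne
  have e : (ds.length : Int) = 1 + ((ds.length - 1 : Nat) : Int) := by omega
  rw [pvB]
  simp only [cac_doan_giam, PySem.List.len_eq]
  rw [e, pv_inv ds hne (ds.length - 1) (by omega)]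
  dsimp only
  by_cases hl : (PySem.List.slice ds
      (some (pvLast (pvCuts ds (1 + ((ds.length - 1 : Nat) : Int)))))
      (some (1 + ((ds.length - 1 : Nat) : Int)))).length > 1
  · rw [if_pos hl]; simp [hl]
  · rw [if_neg hl]; simp [hl]

-- ===== VERDICT (by name: the statement is the Claim_ definition above) =====
theorem cac_doan_giam_spec : Claim_equal_cac_doan_giam := by
  intro ds _ hne
  exact pv_main ds hne
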